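-- pv_equiv track=rewrite | github.com/heggria/agent-usage-atlas | src/agent_usage_atlas/aggregation/tool_safety.py | _detect_redundant_read
-- ===== SOURCE A (Python) =====
-- def _count_consecutive_runs(sequence: list[str], predicate, min_run: int) -> int:
--     """Count how many times *predicate* holds for *min_run*+ consecutive items."""
--     violations = 0
--     run = 0
--     for item in sequence:
--         if predicate(item):
--             run += 1
--             if run == min_run:
--                 violations += 1
--         else:
--             run = 0
--     return violations
--
-- def _detect_redundant_read(sequences: dict) -> tuple[int, int]:
--     """3+ consecutive Read calls without an intervening Write/Edit."""
--     total = 0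
--     sessions = 0
--     for seq in sequences.values():
--         hits = _count_consecutive_runs(seq, lambda t: t == "Read", 3)
--         if hits:
--             total += hits
--             sessions += 1
--     return total, sessions
-- ===== SOURCE B (Python) =====
-- def _run_hits(seq):
--     """Number of maximal runs of "Read" of length >= 3, by splitting off whole runs."""
--     hits = 0
--     rest = seq
--     while rest:
--         if rest[0] != "Read":
--             rest = rest[1:]
--         else:
--             run = 0
--             while rest and rest[0] == "Read":
--                 run += 1
--                 rest = rest[1:]
--             if run >= 3:
--                 hits += 1
--     return hits
--
-- def _detect_redundant_read(sequences: dict) -> tuple[int, int]: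
--     per = [_run_hits(seq) for seq in sequences.values()]
--     pos = [h for h in per if h]
--     return sum(pos), len(pos)
-- ===== Notes on version B (the rewrite author's own statement) =====
-- stated objective: alternative
-- what changed: Per sequence, the interleaved run-counter-with-threshold scan is replaced by splitting off maximal "Read" runs and counting those of length >= 3; the outer accumulator loop is replaced by mapping each sequence to its hit count and deriving (sum, count of nonzero) from that list.
import Mathlib
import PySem

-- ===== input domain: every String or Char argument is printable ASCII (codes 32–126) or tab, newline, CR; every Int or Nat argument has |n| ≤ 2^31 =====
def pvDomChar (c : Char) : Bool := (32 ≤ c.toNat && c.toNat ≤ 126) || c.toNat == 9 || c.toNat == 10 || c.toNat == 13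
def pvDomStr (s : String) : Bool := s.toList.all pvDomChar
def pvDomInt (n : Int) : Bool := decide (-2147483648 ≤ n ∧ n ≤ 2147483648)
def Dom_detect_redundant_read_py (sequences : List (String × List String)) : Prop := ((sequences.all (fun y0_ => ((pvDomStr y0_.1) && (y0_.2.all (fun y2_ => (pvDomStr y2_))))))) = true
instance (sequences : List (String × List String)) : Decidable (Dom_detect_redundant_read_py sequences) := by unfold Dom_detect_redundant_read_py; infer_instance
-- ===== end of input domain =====

-- B replaces the interleaved run-counter scan by splitting each sequence into maximal "Read" runs
-- and counting the qualifying runs, then derives (total, sessions) from the per-sequence hit list (objective: alternative).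


-- ===== PORT A =====
-- _count_consecutive_runs: fold carrying (violations, run)
def count_consecutive_runs_py (sequence : List String) (pred : String → Bool) (minRun : Int) : Int :=
  (sequence.foldl (fun (st : Int × Int) item =>
      if pred item then
        let run := st.2 + 1
        ((if run = minRun then st.1 + 1 else st.1), run)
      else (st.1, 0)) (0, 0)).1

def detect_redundant_read_py (sequences : List (String × List String)) : Int × Int :=
  sequences.foldl (fun (st : Int × Int) kv =>
    let hits := count_consecutive_runs_py kv.2 (fun t => t == "Read") 3
    if hits ≠ 0 then (st.1 + hits, st.2 + 1) else st) (0, 0)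

-- ===== PORT B =====
-- _run_hits: strip a whole maximal "Read" run at a time (the inner while = takeWhile/dropWhile)
def run_hits_b (seq : List String) : Int :=
  match seq with
  | [] => 0
  | x :: xs =>
    if x ≠ "Read" then run_hits_b xs
    else
      let run : Int := (xs.takeWhile (· == "Read")).length + 1
      let rest := xs.dropWhile (· == "Read")
      (if run ≥ 3 then (1 : Int) else 0) + run_hits_b rest
termination_by seq.length
decreasing_by
  · simp
  · have := List.length_dropWhile_le (p := (· == "Read")) (l := xs)
    simp; omega

def detect_redundant_read_py_alt (sequences : List (String × List String)) : Int × Int :=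
  let per := sequences.map (fun kv => run_hits_b kv.2)
  let pos := per.filter (fun h => h != 0)
  (pos.sum, (pos.length : Int))

-- ===== PRECONDITION & SPEC =====
def Spec_detect_redundant_read_py (sequences : List (String × List String)) (out : Int × Int) : Prop := out = detect_redundant_read_py_alt sequences
instance (sequences : List (String × List String)) (out : Int × Int) : Decidable (Spec_detect_redundant_read_py sequences out) := by unfold Spec_detect_redundant_read_py; infer_instance

-- ===== CLAIM (what is proved, stated in full; the proofs are below) =====
def Claim_equal_detect_redundant_read_py : Prop := ∀ (sequences : List (String × List String)), Dom_detect_redundant_read_py sequences → Spec_detect_redundant_read_py sequences (detect_redundant_read_py sequences)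

-- ===== LEMMAS AND PROOFS =====

-- proof-side model of A's inner scan, violations pulled out of the state
def auxA : Int → List String → Int
  | _, [] => 0
  | r, x :: xs => if x == "Read" then (if r + 1 = 3 then 1 else 0) + auxA (r + 1) xs else auxA 0 xs

theorem foldA_eq_auxA (xs : List String) : ∀ v r : Int,
    (xs.foldl (fun (st : Int × Int) item =>
      if (item == "Read") then
        ((if st.2 + 1 = 3 then st.1 + 1 else st.1), st.2 + 1)
      else (st.1, 0)) (v, r)).1 = v + auxA r xs := by
  induction xs with
  | nil => intro v r; simp [auxA]
  | cons x xs ih =>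
    intro v r
    by_cases h : (x == "Read") = true
    · simp only [List.foldl_cons, if_pos h]
      rw [ih, auxA, if_pos h]
      split_ifs <;> ring
    · simp only [List.foldl_cons, if_neg h]
      rw [ih, auxA, if_neg h]

theorem countA_eq_auxA (xs : List String) :
    count_consecutive_runs_py xs (fun t => t == "Read") 3 = auxA 0 xs := by
  have := foldA_eq_auxA xs 0 0
  simpa [count_consecutive_runs_py] using this

theorem auxA_replicate (rest : List String) (hrest : rest = [] ∨ ∃ y ys, rest = y :: ys ∧ y ≠ "Read") :
    ∀ (k : ℕ) (r : Int), auxA r (List.replicate k "Read" ++ rest) =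
      (if r < 3 ∧ 3 ≤ r + k then 1 else 0) + auxA 0 rest := by
  intro k
  induction k with
  | zero =>
    intro r
    rcases hrest with h | ⟨y, ys, h, hy⟩
    · simp [h, auxA]
    · simp [h, auxA, hy]
  | succ k ih =>
    intro r
    have hsplit : List.replicate (k + 1) "Read" ++ rest = "Read" :: (List.replicate k "Read" ++ rest) := by
      simp [List.replicate_succ]
    rw [hsplit]
    simp only [auxA, beq_self_eq_true, if_true]
    rw [ih (r + 1)]
    have hind : ((if r + 1 = 3 then (1:Int) else 0) + (if r + 1 < 3 ∧ 3 ≤ r + 1 + (k:Int) then (1:Int) else 0))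
         = (if r < 3 ∧ 3 ≤ r + ((k:Int) + 1) then (1:Int) else 0) := by
      split_ifs <;> omega
    push_cast
    push_cast at hind
    omega

theorem run_hits_b_cons (x : String) (xs : List String) :
    run_hits_b (x :: xs) = if x ≠ "Read" then run_hits_b xs
      else (if ((xs.takeWhile (· == "Read")).length : Int) + 1 ≥ 3 then 1 else 0)
        + run_hits_b (xs.dropWhile (· == "Read")) := by
  rw [run_hits_b.eq_def]

theorem countA_eq_runHits (xs : List String) :
    count_consecutive_runs_py xs (fun t => t == "Read") 3 = run_hits_b xs := by
  rw [countA_eq_auxA]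
  induction hn : xs.length using Nat.strong_induction_on generalizing xs with
  | _ n ih =>
  match xs with
  | [] => simp [auxA, run_hits_b]
  | x :: xs =>
    by_cases h : x = "Read"
    · subst h
      have hdec : xs = xs.takeWhile (· == "Read") ++ xs.dropWhile (· == "Read") :=
        (List.takeWhile_append_dropWhile (p := (· == "Read")) (l := xs)).symm
      have hrep : xs.takeWhile (· == "Read") =
          List.replicate (xs.takeWhile (· == "Read")).length "Read" := by
        apply List.eq_replicate_of_mem
        intro b hb
        simpa using List.mem_takeWhile_imp hb
      set rest := xs.dropWhile (· == "Read") with hrestdef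
      have hrest : rest = [] ∨ ∃ y ys, rest = y :: ys ∧ y ≠ "Read" := by
        cases hr : rest with
        | nil => exact Or.inl rfl
        | cons y ys =>
          right
          refine ⟨y, ys, rfl, ?_⟩
          have hd := List.head?_dropWhile_not (p := (· == "Read")) (l := xs)
          rw [← hrestdef, hr] at hd
          simpa using hd
      have hxs : ("Read" : String) :: xs =
          List.replicate ((xs.takeWhile (· == "Read")).length + 1) "Read" ++ rest := by
        rw [List.replicate_succ, List.cons_append]
        conv_lhs => rw [hdec, hrep]
      have hlen : rest.length < n := by
        have := List.length_dropWhile_le (p := (· == "Read")) (l := xs)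
        rw [← hrestdef] at this
        subst hn
        simp only [List.length_cons]
        omega
      have hih : auxA 0 rest = run_hits_b rest := ih rest.length hlen rest rfl
      rw [run_hits_b_cons]
      simp only [ne_eq, not_true_eq_false, if_false]
      conv_lhs => rw [hxs]
      rw [auxA_replicate rest hrest ((xs.takeWhile (· == "Read")).length + 1) 0]
      rw [← hrestdef, hih]
      have : (if (0:Int) < 3 ∧ 3 ≤ (0:Int) + (((xs.takeWhile (· == "Read")).length + 1 : ℕ) : Int) then (1:Int) else 0)
           = (if ((((xs.takeWhile (· == "Read")).length : Int) + 1) ≥ 3) then (1:Int) else 0) := by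
        push_cast
        simp only [true_and]
        norm_num
      rw [this]
    · have h1 : auxA 0 (x :: xs) = auxA 0 xs := by
        rw [auxA]
        simp [h]
      have h2 : run_hits_b (x :: xs) = run_hits_b xs := by
        rw [run_hits_b_cons]
        simp [h]
      rw [h1, h2]
      exact ih xs.length (by subst hn; simp) xs rfl

theorem outer_fold (seqs : List (String × List String)) : ∀ t s : Int,
    seqs.foldl (fun (st : Int × Int) kv =>
      let hits := count_consecutive_runs_py kv.2 (fun t => t == "Read") 3
      if hits ≠ 0 then (st.1 + hits, st.2 + 1) else st) (t, s)
    = (t + ((seqs.map (fun kv => run_hits_b kv.2)).filter (fun h => h != 0)).sum,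
       s + (((seqs.map (fun kv => run_hits_b kv.2)).filter (fun h => h != 0)).length : Int)) := by
  induction seqs with
  | nil => intro t s; simp
  | cons kv seqs ih =>
    intro t s
    simp only [countA_eq_runHits] at ih ⊢
    simp only [List.foldl_cons, List.map_cons, List.filter_cons]
    by_cases h : run_hits_b kv.2 = 0
    · simp only [h, ne_eq, not_true_eq_false, if_false, bne_self_eq_false, Bool.false_eq_true,
        reduceIte]
      exact ih t s
    · simp only [h, ne_eq, not_false_eq_true, if_true, bne_iff_ne, if_pos, List.sum_cons,
        List.length_cons, ih, Prod.mk.injEq]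
      push_cast
      constructor <;> ring

-- ===== VERDICT (by name: the statement is the Claim_ definition above) =====
theorem detect_redundant_read_py_spec : Claim_equal_detect_redundant_read_py := by
  intro seqs _
  unfold Spec_detect_redundant_read_py detect_redundant_read_py detect_redundant_read_py_alt
  rw [outer_fold seqs 0 0]
  simp
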